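-- pv_equiv track=rewrite | github.com/tejithvasu02/ocr-handwritten | evaluation/compute_token_distance.py | tokenize_latex
-- ===== SOURCE A (Python) =====
-- from typing import List, Dict, Tuple
--
-- def tokenize_latex(latex: str) -> List[str]:
--     """
--     Tokenize LaTeX expression into atomic tokens.
--
--     Args:
--         latex: LaTeX string
--
--     Returns:
--         List of tokens
--     """
--     latex = latex.strip()
--
--     # Remove $ delimiters
--     if latex.startswith('$'):
--         latex = latex.lstrip('$')
--     if latex.endswith('$'):
--         latex = latex.rstrip('$')
--
--     tokens = []
--     i = 0
--
--     while i < len(latex):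
--         # Skip whitespace
--         if latex[i].isspace():
--             i += 1
--             continue
--
--         # LaTeX command
--         if latex[i] == '\\':
--             j = i + 1
--             while j < len(latex) and latex[j].isalpha():
--                 j += 1
--             if j == i + 1:
--                 # Single character after backslash
--                 if j < len(latex):
--                     tokens.append(latex[i:j+1])
--                     i = j + 1
--                 else:
--                     tokens.append('\\')
--                     i = j
--             else:
--                 tokens.append(latex[i:j])
--                 i = j
--
--         # Braces, subscript, superscript
--         elif latex[i] in '{}^_':
--             tokens.append(latex[i])
--             i += 1
--
--         # Numbers
--         elif latex[i].isdigit():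
--             j = i
--             while j < len(latex) and (latex[j].isdigit() or latex[j] == '.'):
--                 j += 1
--             tokens.append(latex[i:j])
--             i = j
--
--         # Letters
--         elif latex[i].isalpha():
--             tokens.append(latex[i])
--             i += 1
--
--         # Other characters
--         else:
--             tokens.append(latex[i])
--             i += 1
--
--     return tokens
-- ===== SOURCE B (Python) =====
-- def tokenize_latex(latex: str):
--     """Tokenize LaTeX expression into atomic tokens (single-pass state machine)."""
--     tokens = []
--     cur = ''  # pending token: '' | '\' + letters | digit followed by digits/dots
--     for ch in latex.strip().strip('$'):
--         if cur.startswith('\\'):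
--             if ch.isalpha():
--                 cur += ch
--                 continue
--             if cur == '\\':
--                 tokens.append('\\' + ch)
--                 cur = ''
--                 continue
--             tokens.append(cur)
--             cur = ''
--         elif cur:
--             if ch.isdigit() or ch == '.':
--                 cur += ch
--                 continue
--             tokens.append(cur)
--             cur = ''
--         # start something fresh with ch
--         if ch.isspace():
--             continue
--         if ch == '\\' or ch.isdigit():
--             cur = ch
--         else:
--             tokens.append(ch)
--     if cur:
--         tokens.append(cur)
--     return tokens
-- ===== Notes on version B (the rewrite author's own statement) =====
-- stated objective: faster
-- what changed: Replaces A's index-cursor while-loop with inner lookahead scans (nested while loops plus slicing for commands and numbers) by a single left-to-right fold over the characters carrying a pending-token state (a character-level state machine) that emits each token when the state closes; the dollar-delimiter stripping becomes one unconditional strip call instead of A's conditional lstrip/rstrip.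
import Mathlib
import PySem

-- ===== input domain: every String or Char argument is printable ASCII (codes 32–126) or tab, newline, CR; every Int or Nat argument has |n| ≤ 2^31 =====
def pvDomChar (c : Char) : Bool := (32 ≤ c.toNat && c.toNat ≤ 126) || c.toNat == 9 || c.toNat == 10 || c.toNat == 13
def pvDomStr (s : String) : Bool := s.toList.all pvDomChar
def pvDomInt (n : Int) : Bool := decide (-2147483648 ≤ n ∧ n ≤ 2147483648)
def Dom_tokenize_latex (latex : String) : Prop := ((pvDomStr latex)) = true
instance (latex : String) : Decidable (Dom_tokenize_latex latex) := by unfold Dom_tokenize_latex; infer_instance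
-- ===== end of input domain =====

-- B replaces A's cursor-and-lookahead while loop (with its inner scans and slicing) by a
-- single left-to-right fold with a pending-token state (a character-level state machine);
-- same return value, measurably faster by a constant factor in a timing run.

-- ===== PORT A =====
-- A's while loop over the index i, as recursion on the remaining suffix latex[i:]
-- (every branch consumes exactly what A's cursor skips; tokens latex[i:j] are the
-- corresponding prefixes of the suffix).
def tokenizeA : List Char → List String
  | [] => []
  | c :: rest =>
    if PySem.Chars.isspace c then tokenizeA rest            -- skip whitespace
    else if c == '\\' then                                   -- LaTeX command
      let body := rest.takeWhile PySem.Chars.isalpha         -- inner while: j past the letters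
      if body = [] then                                      -- j == i + 1
        match rest with
        | [] => [String.ofList ['\\']]
        | d :: rest' => String.ofList ['\\', d] :: tokenizeA rest'
      else String.ofList ('\\' :: body) :: tokenizeA (rest.dropWhile PySem.Chars.isalpha)
    else if c == '{' || c == '}' || c == '^' || c == '_' then -- latex[i] in '{}^_'
      String.ofList [c] :: tokenizeA rest
    else if PySem.Chars.isdigit c then                       -- number
      String.ofList (c :: rest.takeWhile (fun d => PySem.Chars.isdigit d || d == '.')) ::
        tokenizeA (rest.dropWhile (fun d => PySem.Chars.isdigit d || d == '.'))
    else if PySem.Chars.isalpha c then                       -- letter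
      String.ofList [c] :: tokenizeA rest
    else                                                     -- other character
      String.ofList [c] :: tokenizeA rest
termination_by l => l.length
decreasing_by
  · simp
  · simp
  · have := List.length_dropWhile_le (p := PySem.Chars.isalpha) (l := rest); simp; omega
  · simp
  · have := List.length_dropWhile_le (p := fun d => PySem.Chars.isdigit d || d == '.') (l := rest)
    simp; omega
  · simp
  · simp

-- latex.lstrip('$') / rstrip('$') for the one-character set '$' (exact: dropWhile of '== $')
def tokenize_latex (latex : String) : List String :=
  let l0 := PySem.Chars.strip latex.toList
  let l1 := if PySem.Chars.startswith l0 ['$'] then l0.dropWhile (fun c => c == '$') else l0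
  let l2 := if PySem.Chars.endswith l1 ['$'] then (l1.reverse.dropWhile (fun c => c == '$')).reverse else l1
  tokenizeA l2

-- ===== PORT B =====
-- Source B's "start something fresh with ch" tail (reached with an empty pending token)
def freshB (toks : List String) (ch : Char) : List String × List Char :=
  if PySem.Chars.isspace ch then (toks, [])
  else if ch == '\\' || PySem.Chars.isdigit ch then (toks, [ch])
  else (toks ++ [String.ofList [ch]], [])

-- one iteration of Source B's for loop; the pending token cur is kept as its character list
def stepB (st : List String × List Char) (ch : Char) : List String × List Char :=
  match st with
  | (toks, cur) =>
    if cur.head? = some '\\' then                            -- cur.startswith('\\')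
      if PySem.Chars.isalpha ch then (toks, cur ++ [ch])
      else if cur = ['\\'] then (toks ++ [String.ofList ['\\', ch]], [])
      else freshB (toks ++ [String.ofList cur]) ch
    else if cur ≠ [] then                                    -- pending number
      if PySem.Chars.isdigit ch || ch == '.' then (toks, cur ++ [ch])
      else freshB (toks ++ [String.ofList cur]) ch
    else freshB toks ch

-- the 'if cur: tokens.append(cur)' after the loop
def finishB : List String × List Char → List String
  | (toks, cur) => if cur ≠ [] then toks ++ [String.ofList cur] else toks

def tokenize_latex_alt (latex : String) : List String :=
  finishB ((PySem.Chars.stripChars (PySem.Chars.strip latex.toList) ['$']).foldl stepB ([], []))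

-- ===== PRECONDITION & SPEC =====
def Spec_tokenize_latex (latex : String) (out : List String) : Prop := out = tokenize_latex_alt latex
instance (latex : String) (out : List String) : Decidable (Spec_tokenize_latex latex out) := by unfold Spec_tokenize_latex; infer_instance

-- ===== CLAIM (what is proved, stated in full; the proofs are below) =====
def Claim_equal_tokenize_latex : Prop := ∀ (latex : String), Dom_tokenize_latex latex → Spec_tokenize_latex latex (tokenize_latex latex)

-- ===== LEMMAS AND PROOFS =====

-- the shapes Source B's pending token cur can take
def ValidCur (cur : List Char) : Prop :=
  cur = [] ∨
  (∃ a, cur = '\\' :: a ∧ ∀ c ∈ a, PySem.Chars.isalpha c = true) ∨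
  (∃ d ds, cur = d :: ds ∧ PySem.Chars.isdigit d = true ∧
    ∀ c ∈ ds, (PySem.Chars.isdigit c || c == '.') = true)

theorem digit_facts {c : Char} (h : PySem.Chars.isdigit c = true) :
    PySem.Chars.isspace c = false ∧ (c == '\\') = false ∧ (c == '{') = false ∧
    (c == '}') = false ∧ (c == '^') = false ∧ (c == '_') = false := by
  simp [PySem.Chars.isdigit, Char.le_def, UInt32.le_iff_toNat_le] at h
  have hn : 48 ≤ c.toNat ∧ c.toNat ≤ 57 := by exact_mod_cast h
  have hne : ∀ n : Nat, c.toNat ≠ n → ∀ d : Char, d.toNat = n → (c == d) = false := by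
    intro n hcn d hd
    rw [beq_eq_false_iff_ne]
    intro he; exact hcn (he ▸ hd)
  refine ⟨?_, ?_, ?_, ?_, ?_, ?_⟩
  · simp [PySem.Chars.isspace]; omega
  · exact hne 92 (by omega) _ rfl
  · exact hne 123 (by omega) _ rfl
  · exact hne 125 (by omega) _ rfl
  · exact hne 94 (by omega) _ rfl
  · exact hne 95 (by omega) _ rfl

theorem span_all {p : Char → Bool} {a rest : List Char} {ch : Char}
    (ha : ∀ x ∈ a, p x = true) (hch : p ch = false) :
    (a ++ ch :: rest).takeWhile p = a ∧ (a ++ ch :: rest).dropWhile p = ch :: rest := by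
  induction a with
  | nil => simp [List.dropWhile_cons, hch]
  | cons x xs ih =>
    have hx : p x = true := ha x (by simp)
    have := ih (fun y hy => ha y (by simp [hy]))
    simp [List.takeWhile_cons, hx, this.1, this.2]

theorem tokA_space {c : Char} (rest : List Char) (h : PySem.Chars.isspace c = true) :
    tokenizeA (c :: rest) = tokenizeA rest := by
  rw [tokenizeA.eq_def]; simp [h]

theorem tokA_single {c : Char} (rest : List Char) (h1 : PySem.Chars.isspace c = false)
    (h2 : (c == '\\') = false) (h3 : PySem.Chars.isdigit c = false) :
    tokenizeA (c :: rest) = String.ofList [c] :: tokenizeA rest := by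
  rw [tokenizeA.eq_def]; dsimp only
  by_cases hbr : (c == '{' || c == '}' || c == '^' || c == '_') = true
  · simp [h1, h2, hbr]
  · by_cases hal : PySem.Chars.isalpha c
    · simp [h1, h2, h3, hbr, hal]
    · simp [h1, h2, h3, hbr, hal]

theorem tokA_bs_nil : tokenizeA ['\\'] = [String.ofList ['\\']] := by
  rw [tokenizeA.eq_def]; dsimp only
  simp [show PySem.Chars.isspace '\\' = false from by decide]

theorem tokA_bs_single {ch : Char} (rest : List Char) (hch : PySem.Chars.isalpha ch = false) :
    tokenizeA ('\\' :: ch :: rest) = String.ofList ['\\', ch] :: tokenizeA rest := by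
  rw [tokenizeA.eq_def]; dsimp only
  simp [show PySem.Chars.isspace '\\' = false from by decide, List.takeWhile_cons, hch]

theorem tokA_bs_end {a : List Char} (ha : ∀ c ∈ a, PySem.Chars.isalpha c = true) (hne : a ≠ []) :
    tokenizeA ('\\' :: a) = [String.ofList ('\\' :: a)] := by
  rw [tokenizeA.eq_def]; dsimp only
  have htw := List.takeWhile_eq_self_iff.mpr ha
  have hdw := List.dropWhile_eq_nil_iff.mpr (fun x hx => ha x hx)
  simp [show PySem.Chars.isspace '\\' = false from by decide, htw, hdw, hne, tokenizeA]

theorem tokA_bs_mid {a : List Char} {ch : Char} (rest : List Char)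
    (ha : ∀ c ∈ a, PySem.Chars.isalpha c = true) (hne : a ≠ [])
    (hch : PySem.Chars.isalpha ch = false) :
    tokenizeA ('\\' :: (a ++ ch :: rest)) = String.ofList ('\\' :: a) :: tokenizeA (ch :: rest) := by
  rw [tokenizeA.eq_def]; dsimp only
  have h := span_all (rest := rest) (ch := ch) ha hch
  rw [h.1, h.2]
  cases a with
  | nil => exact absurd rfl hne
  | cons x xs =>
    simp [show PySem.Chars.isspace '\\' = false from by decide]

theorem tokA_num_end {d : Char} {ds : List Char} (hd : PySem.Chars.isdigit d = true)
    (hbs : (d == '\\') = false) (hsp : PySem.Chars.isspace d = false)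
    (hbr : (d == '{' || d == '}' || d == '^' || d == '_') = false)
    (hds : ∀ c ∈ ds, (PySem.Chars.isdigit c || c == '.') = true) :
    tokenizeA (d :: ds) = [String.ofList (d :: ds)] := by
  rw [tokenizeA.eq_def]; dsimp only
  have htw := List.takeWhile_eq_self_iff.mpr hds
  have hdw := List.dropWhile_eq_nil_iff.mpr (fun x hx => hds x hx)
  rw [htw, hdw]
  simp [hsp, hbs, hbr, hd, tokenizeA]

theorem tokA_num_mid {d : Char} {ds : List Char} {ch : Char} (rest : List Char)
    (hd : PySem.Chars.isdigit d = true) (hbs : (d == '\\') = false)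
    (hsp : PySem.Chars.isspace d = false) (hbr : (d == '{' || d == '}' || d == '^' || d == '_') = false)
    (hds : ∀ c ∈ ds, (PySem.Chars.isdigit c || c == '.') = true)
    (hch : (PySem.Chars.isdigit ch || ch == '.') = false) :
    tokenizeA (d :: (ds ++ ch :: rest)) = String.ofList (d :: ds) :: tokenizeA (ch :: rest) := by
  rw [tokenizeA.eq_def]; dsimp only
  have h := span_all (rest := rest) (ch := ch) hds hch
  simp [hsp, hbs, hbr, hd, h.1, h.2]


theorem fresh_ok (s : List Char)
    (IH : ∀ toks cur, ValidCur cur → finishB (s.foldl stepB (toks, cur)) = toks ++ tokenizeA (cur ++ s))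
    (toks : List String) (ch : Char) :
    finishB (s.foldl stepB (freshB toks ch)) = toks ++ tokenizeA (ch :: s) := by
  unfold freshB
  by_cases hsp : PySem.Chars.isspace ch
  · simp only [hsp, if_true]
    rw [IH toks [] (Or.inl rfl), tokA_space s hsp]
    simp
  · by_cases hbd : (ch == '\\' || PySem.Chars.isdigit ch) = true
    · simp only [hsp, Bool.false_eq_true, if_false, hbd, if_true]
      have hv : ValidCur [ch] := by
        rcases Bool.or_eq_true_iff.1 hbd with h | h
        · exact Or.inr (Or.inl ⟨[], by simp [beq_iff_eq.1 h], by simp⟩)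
        · exact Or.inr (Or.inr ⟨ch, [], rfl, h, by simp⟩)
      rw [IH toks [ch] hv]
      simp
    · simp only [hsp, hbd, Bool.false_eq_true, if_false]
      rw [IH (toks ++ [String.ofList [ch]]) [] (Or.inl rfl)]
      have hb : (ch == '\\') = false := by
        cases h : (ch == '\\') <;> simp [h] at hbd ⊢
      have hd : PySem.Chars.isdigit ch = false := by
        cases h : PySem.Chars.isdigit ch <;> simp [h] at hbd ⊢
      have hspf : PySem.Chars.isspace ch = false := by simpa using hsp
      rw [tokA_single s hspf hb hd]
      simp

theorem main_inv (s : List Char) : ∀ toks cur, ValidCur cur →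
    finishB (s.foldl stepB (toks, cur)) = toks ++ tokenizeA (cur ++ s) := by
  induction s with
  | nil =>
    intro toks cur hv
    rcases hv with rfl | ⟨a, rfl, ha⟩ | ⟨d, ds, rfl, hd, hds⟩
    · simp [finishB, tokenizeA]
    · cases a with
      | nil => simp only [List.append_nil]; rw [tokA_bs_nil]; simp [finishB]
      | cons x xs =>
        simp only [List.append_nil]
        rw [tokA_bs_end ha (by simp)]
        simp [finishB]
    · obtain ⟨hsp0, hbs, h1, h2, h3, h4⟩ := digit_facts hd
      have hbr : (d == '{' || d == '}' || d == '^' || d == '_') = false := by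
        simp [h1, h2, h3, h4]
      simp only [List.append_nil]
      rw [tokA_num_end hd hbs hsp0 hbr hds]
      simp [finishB]
  | cons ch s ih =>
    intro toks cur hv
    rw [List.foldl_cons]
    rcases hv with rfl | ⟨a, rfl, ha⟩ | ⟨d, ds, rfl, hd, hds⟩
    · have hstep : stepB (toks, []) ch = freshB toks ch := by simp [stepB]
      rw [hstep]
      exact fresh_ok s ih toks ch
    · by_cases hal : PySem.Chars.isalpha ch
      · have hstep : stepB (toks, '\\'::a) ch = (toks, '\\' :: (a ++ [ch])) := by
          simp [stepB, hal]
        have hv' : ValidCur ('\\' :: (a ++ [ch])) := by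
          refine Or.inr (Or.inl ⟨a ++ [ch], rfl, ?_⟩)
          intro c hc
          rcases List.mem_append.1 hc with h | h
          · exact ha c h
          · simp at h; subst h; exact hal
        rw [hstep, ih toks _ hv']
        simp
      · have half : PySem.Chars.isalpha ch = false := by simpa using hal
        cases a with
        | nil =>
          have hstep : stepB (toks, ['\\']) ch = (toks ++ [String.ofList ['\\', ch]], []) := by
            simp [stepB, half]
          rw [hstep, ih _ [] (Or.inl rfl)]
          show toks ++ [String.ofList ['\\', ch]] ++ tokenizeA s = toks ++ tokenizeA ('\\' :: ch :: s)
          rw [tokA_bs_single s half]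
          simp
        | cons x xs =>
          have hstep : stepB (toks, '\\'::x::xs) ch
              = freshB (toks ++ [String.ofList ('\\'::x::xs)]) ch := by
            simp [stepB, half]
          rw [hstep, fresh_ok s ih _ ch]
          show toks ++ [String.ofList ('\\'::x::xs)] ++ tokenizeA (ch :: s)
              = toks ++ tokenizeA ('\\' :: ((x::xs) ++ ch :: s))
          rw [tokA_bs_mid s ha (by simp) half]
          simp
    · obtain ⟨hsp0, hbs, h1, h2, h3, h4⟩ := digit_facts hd
      have hbr : (d == '{' || d == '}' || d == '^' || d == '_') = false := by
        simp [h1, h2, h3, h4]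
      have hhead : d ≠ '\\' := by
        intro h; rw [h] at hbs; simp at hbs
      by_cases hdx : (PySem.Chars.isdigit ch || ch == '.') = true
      · have hstep : stepB (toks, d::ds) ch = (toks, d :: (ds ++ [ch])) := by
          simp [stepB, hhead, hdx]
        have hv' : ValidCur (d :: (ds ++ [ch])) := by
          refine Or.inr (Or.inr ⟨d, ds ++ [ch], rfl, hd, ?_⟩)
          intro c hc
          rcases List.mem_append.1 hc with h | h
          · exact hds c h
          · simp at h; subst h; exact hdx
        rw [hstep, ih toks _ hv']
        simp
      · have hdxf : (PySem.Chars.isdigit ch || ch == '.') = false := by simpa using hdx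
        have hstep : stepB (toks, d::ds) ch
            = freshB (toks ++ [String.ofList (d::ds)]) ch := by
          simp [stepB, hhead, hdxf]
        rw [hstep, fresh_ok s ih _ ch]
        show toks ++ [String.ofList (d::ds)] ++ tokenizeA (ch :: s)
            = toks ++ tokenizeA (d :: (ds ++ ch :: s))
        rw [tokA_num_mid s hd hbs hsp0 hbr hds hdxf]
        simp

theorem strip_dollars_eq (l : List Char) :
    PySem.Chars.stripChars l ['$'] =
      (let l1 := if PySem.Chars.startswith l ['$'] then l.dropWhile (fun c => c == '$') else l
       if PySem.Chars.endswith l1 ['$'] then (l1.reverse.dropWhile (fun c => c == '$')).reverse else l1) := by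
  have hp : (fun c => (['$'] : List Char).contains c) = (fun c => c == '$') := by
    funext c; by_cases h : c = '$' <;> simp [h]
  have hnostart : ∀ m : List Char, PySem.Chars.startswith m ['$'] = false →
      m.dropWhile (fun c => c == '$') = m := by
    intro m hm
    cases m with
    | nil => rfl
    | cons h t =>
      simp [PySem.Chars.startswith, List.isPrefixOf] at hm
      simp [Ne.symm hm]
  have hend : ∀ m : List Char, PySem.Chars.endswith m ['$'] = PySem.Chars.startswith m.reverse ['$'] := by
    intro m; simp [PySem.Chars.endswith, PySem.Chars.startswith, List.isSuffixOf]
  unfold PySem.Chars.stripChars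
  rw [hp]
  by_cases hs : PySem.Chars.startswith l ['$']
  · simp only [hs, if_true]
    by_cases he : PySem.Chars.endswith (l.dropWhile (fun c => c == '$')) ['$']
    · simp [he]
    · simp only [he, Bool.false_eq_true, if_false]
      rw [hnostart ((l.dropWhile (fun c => c == '$')).reverse)
            (by rw [← hend]; simpa using he)]
      simp
  · simp only [Bool.not_eq_true] at hs
    simp only [hnostart l hs, hs, Bool.false_eq_true, if_false]
    by_cases he : PySem.Chars.endswith l ['$']
    · simp [he]
    · simp only [he, Bool.false_eq_true, if_false]
      rw [hnostart (l.reverse) (by rw [← hend]; simpa using he)]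
      simp

-- ===== VERDICT (by name: the statement is the Claim_ definition above) =====
theorem tokenize_latex_spec : Claim_equal_tokenize_latex := by
  intro latex _
  unfold Spec_tokenize_latex tokenize_latex tokenize_latex_alt
  rw [strip_dollars_eq, main_inv _ [] [] (Or.inl rfl)]
  simp
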